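-- pv_equiv track=rewrite | github.com/sohail9972/Python_WALL_E | CodePart/arryaProblem/Place Book Problem.py | placeBooks
-- ===== SOURCE A (Python) =====
-- def placeBooks(arr, k):
--     if k==0:
--         return True
--
--     bookCount=0
--
--     for i in range(len(arr)):
--         isleft=(i==0) or (arr[i-1]==0)
--         isright = (i==len(arr)-1) or (arr[i+1]==0)
--
--
--         if(arr[i]==0 and isleft and isright):
--             arr[i]=1
--             bookCount +=1
--             if(bookCount==k):
--                 return True
--
--     return False
-- ===== SOURCE B (Python) =====
-- def placeBooks(arr, k):
--     # Run-based re-implementation: scan maximal zero runs and place books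
--     # run by run instead of simulating cell-by-cell mutation. Does NOT
--     # mutate arr (A does); equivalence is about the return value.
--     if k == 0:
--         return True
--     n = len(arr)
--     need = k
--     i = 0
--     while i < n:
--         if arr[i] != 0:
--             i += 1
--         else:
--             j = i
--             while j < n and arr[j] == 0:
--                 j += 1
--             e = j - 1
--             p = i if i == 0 else i + 1
--             found = False
--             while p <= e:
--                 if p == e and j < n:
--                     break
--                 need -= 1
--                 if need == 0:
--                     found = True
--                     break
--                 p += 2
--             if found:
--                 return True
--             i = j
--     return False
-- ===== Notes on version B (the rewrite author's own statement) =====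
-- stated objective: alternative
-- what changed: B decomposes the array into maximal zero runs and places books arithmetically (every second cell of each run, with the boundary rules) while A simulates cell-by-cell with in-place mutation of arr; B does not mutate arr.
import Mathlib
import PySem

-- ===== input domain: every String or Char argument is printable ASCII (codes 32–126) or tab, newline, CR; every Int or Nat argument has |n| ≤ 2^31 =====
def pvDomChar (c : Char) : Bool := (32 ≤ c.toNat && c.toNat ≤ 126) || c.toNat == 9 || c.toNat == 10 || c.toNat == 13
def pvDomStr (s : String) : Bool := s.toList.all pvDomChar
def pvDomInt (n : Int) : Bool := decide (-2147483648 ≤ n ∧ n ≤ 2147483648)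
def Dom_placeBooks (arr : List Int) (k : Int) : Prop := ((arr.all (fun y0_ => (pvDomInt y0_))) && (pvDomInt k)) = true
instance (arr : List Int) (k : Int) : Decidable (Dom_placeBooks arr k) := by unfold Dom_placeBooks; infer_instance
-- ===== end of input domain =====

-- B replaces A's cell-by-cell simulation (which mutates arr in place) by a scan over
-- maximal zero runs with arithmetic placement; equivalence is about the RETURN value
-- only (A mutates its argument, B does not).

-- ===== PORT A =====
-- A's for-loop over range(len(arr)) with in-place mutation, as structural recursion
-- carrying the current array and bookCount. All indices read are in range, so
-- List.getD is exact for Python's arr[i-1]/arr[i]/arr[i+1] here.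
def goA (k : Int) (n : Nat) (i : Nat) (arr : List Int) (bc : Int) : Bool :=
  if _h : i < n then
    let isleft := (i == 0) || (arr.getD (i - 1) 0 == 0)
    let isright := (i == n - 1) || (arr.getD (i + 1) 0 == 0)
    if arr.getD i 0 == 0 && isleft && isright then
      let arr' := arr.set i 1
      let bc' := bc + 1
      if bc' == k then true
      else goA k n (i + 1) arr' bc'
    else goA k n (i + 1) arr bc
  else false
  termination_by n - i
  decreasing_by all_goals exact Nat.sub_succ_lt_self n i _h

def placeBooks (arr : List Int) (k : Int) : Bool :=
  if k == 0 then true else goA k arr.length 0 arr 0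

-- ===== PORT B =====
-- B's inner `while j < n and arr[j] == 0: j += 1` scan.
def scanB (arr : List Int) (n : Nat) (j : Nat) : Nat :=
  if h : j < n then
    if arr.getD j 0 == 0 then scanB arr n (j + 1) else j
  else j
  termination_by n - j
  decreasing_by exact Nat.sub_succ_lt_self n j h

lemma scanB_ge (arr : List Int) (n j : Nat) : j ≤ scanB arr n j := by
  unfold scanB
  split
  · split
    · have := scanB_ge arr n (j + 1)
      omega
    · omega
  · omega
  termination_by n - j
  decreasing_by omega

lemma scanB_gt (arr : List Int) (n j : Nat) (hj : j < n) (h0 : arr.getD j 0 = 0) :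
    j < scanB arr n j := by
  unfold scanB
  have h0' : arr[j]?.getD 0 = 0 := by simpa [List.getD] using h0
  simp [hj, h0']
  have := scanB_ge arr n (j + 1)
  omega

-- B's placement loop over one run [p..e]; returns (found, remaining need).
def placeRunB (e : Nat) (bounded : Bool) (p : Nat) (need : Int) : Bool × Int :=
  if h : p ≤ e then
    if p == e && bounded then (false, need)
    else
      let need' := need - 1
      if need' == 0 then (true, need')
      else placeRunB e bounded (p + 2) need'
  else (false, need)
  termination_by e + 1 - p
  decreasing_by
    exact lt_of_le_of_lt (Nat.sub_le_sub_left (Nat.le_succ (p + 1)) (e + 1))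
      (Nat.sub_succ_lt_self (e + 1) p (Nat.lt_succ_of_le h))

lemma eq_zero_of_not_bne {a : Int} (h : ¬ (a != 0) = true) : a = 0 := by
  simpa using h

-- B's outer while loop.
def goB (arr : List Int) (n : Nat) (i : Nat) (need : Int) : Bool :=
  if hi : i < n then
    if arr.getD i 0 != 0 then goB arr n (i + 1) need
    else
      let j := scanB arr n i
      let e := j - 1
      let p := if i == 0 then i else i + 1
      let r := placeRunB e (decide (j < n)) p need
      if r.1 then true else goB arr n j r.2
  else false
  termination_by n - i
  decreasing_by
  · exact Nat.sub_succ_lt_self n i hi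
  · rename_i h0 _hrr
    exact Nat.sub_lt_sub_left hi (scanB_gt arr n i hi (eq_zero_of_not_bne h0))

def placeBooks_alt (arr : List Int) (k : Int) : Bool :=
  if k == 0 then true else goB arr arr.length 0 k

-- ===== PRECONDITION & SPEC =====
def Spec_placeBooks (arr : List Int) (k : Int) (out : Bool) : Prop := out = placeBooks_alt arr k
instance (arr : List Int) (k : Int) (out : Bool) : Decidable (Spec_placeBooks arr k out) := by unfold Spec_placeBooks; infer_instance

-- ===== CLAIM (what is proved, stated in full; the proofs are below) =====
def Claim_equal_placeBooks : Prop := ∀ (arr : List Int) (k : Int), Dom_placeBooks arr k → Spec_placeBooks arr k (placeBooks arr k)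

-- ===== LEMMAS AND PROOFS =====

lemma scanB_le (arr : List Int) (n j : Nat) (h : j ≤ n) : scanB arr n j ≤ n := by
  unfold scanB
  split
  · split
    · exact scanB_le arr n (j + 1) (by omega)
    · omega
  · omega
  termination_by n - j
  decreasing_by omega

lemma scanB_zeros (arr : List Int) (n j : Nat) :
    ∀ m, j ≤ m → m < scanB arr n j → arr.getD m 0 = 0 := by
  intro m hjm hm
  by_cases hj : j < n
  · by_cases h0 : arr.getD j 0 = 0
    · have hrec : scanB arr n j = scanB arr n (j + 1) := by
        have h0' : arr[j]?.getD 0 = 0 := by simpa [List.getD] using h0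
        rw [scanB]
        simp [hj, h0']
      by_cases hmj : m = j
      · simpa [hmj] using h0
      · exact scanB_zeros arr n (j + 1) m (by omega) (hrec ▸ hm)
    · have : scanB arr n j = j := by
        have h0' : ¬ arr[j]?.getD 0 = 0 := by simpa [List.getD] using h0
        rw [scanB]
        simp [hj, h0']
      omega
  · have : scanB arr n j = j := by unfold scanB; simp [hj]
    omega
  termination_by n - j
  decreasing_by omega

lemma scanB_end (arr : List Int) (n j : Nat) (h : j ≤ n) :
    scanB arr n j = n ∨ arr.getD (scanB arr n j) 0 ≠ 0 := by
  by_cases hj : j < n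
  · by_cases h0 : arr.getD j 0 = 0
    · have hrec : scanB arr n j = scanB arr n (j + 1) := by
        have h0' : arr[j]?.getD 0 = 0 := by simpa [List.getD] using h0
        rw [scanB]
        simp [hj, h0']
      rw [hrec]
      exact scanB_end arr n (j + 1) (by omega)
    · have : scanB arr n j = j := by
        have h0' : ¬ arr[j]?.getD 0 = 0 := by simpa [List.getD] using h0
        rw [scanB]
        simp [hj, h0']
      rw [this]; exact Or.inr h0
  · have hjn : j = n := by omega
    have : scanB arr n j = j := by unfold scanB; simp [hj]
    rw [this]; exact Or.inl hjn
  termination_by n - j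
  decreasing_by omega

lemma getD_set_congr (arr1 arr2 : List Int) (hlen : arr1.length = arr2.length)
    (i m : Nat) (h : arr1.getD m 0 = arr2.getD m 0) :
    (arr1.set i 1).getD m 0 = (arr2.set i 1).getD m 0 := by
  simp only [List.getD, List.getElem?_set, hlen] at *
  split_ifs <;> simp_all

lemma getD_set_ne (arr : List Int) (i m : Nat) (h : i ≠ m) :
    (arr.set i 1).getD m 0 = arr.getD m 0 := by
  simp [List.getD, h]

-- goA only reads indices ≥ i-1, so arrays agreeing there give equal results.
lemma goA_ext (k : Int) (n : Nat) (i : Nat) (arr1 arr2 : List Int) (bc : Int)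
    (hlen : arr1.length = arr2.length)
    (h : ∀ m, i ≤ m + 1 → arr1.getD m 0 = arr2.getD m 0) :
    goA k n i arr1 bc = goA k n i arr2 bc := by
  unfold goA
  by_cases hi : i < n
  · rw [dif_pos hi, dif_pos hi]
    have e1 : arr1.getD (i - 1) 0 = arr2.getD (i - 1) 0 := h _ (by omega)
    have e2 : arr1.getD i 0 = arr2.getD i 0 := h _ (by omega)
    have e3 : arr1.getD (i + 1) 0 = arr2.getD (i + 1) 0 := h _ (by omega)
    simp only [e1, e2, e3]
    split
    · split
      · rfl
      · exact goA_ext k n (i + 1) (arr1.set i 1) (arr2.set i 1) (bc + 1)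
          (by simp [hlen])
          (fun m hm => getD_set_congr arr1 arr2 hlen i m (h m (by omega)))
    · exact goA_ext k n (i + 1) arr1 arr2 bc hlen (fun m hm => h m (by omega))
  · rw [dif_neg hi, dif_neg hi]
  termination_by n - i
  decreasing_by all_goals omega

-- if arr[i] ≠ 0 the cell is skipped, so agreement from i on suffices.
lemma goA_nz (k : Int) (n : Nat) (i : Nat) (arr1 arr2 : List Int) (bc : Int)
    (hlen : arr1.length = arr2.length)
    (h : ∀ m, i ≤ m → arr1.getD m 0 = arr2.getD m 0)
    (hnz : arr1.getD i 0 ≠ 0) :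
    goA k n i arr1 bc = goA k n i arr2 bc := by
  unfold goA
  by_cases hi : i < n
  · rw [dif_pos hi, dif_pos hi]
    have e2 : arr1.getD i 0 = arr2.getD i 0 := h i le_rfl
    have hc1 : (arr1.getD i 0 == 0) = false := by simpa using hnz
    have hc2 : (arr2.getD i 0 == 0) = false := by rw [← e2]; exact hc1
    simp only [hc1, hc2, Bool.false_and, if_neg Bool.false_ne_true]
    exact goA_ext k n (i + 1) arr1 arr2 bc hlen (fun m hm => h m (by omega))
  · rw [dif_neg hi, dif_neg hi]

-- the tail of a run: mutations at indices ≤ e do not affect goA from e+1 on.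
lemma goA_tail (k : Int) (n : Nat) (e : Nat) (arr : List Int) (p : Nat) (x : Int)
    (hn : n = arr.length) (hpe : p ≤ e)
    (hbound : e + 1 = n ∨ arr.getD (e + 1) 0 ≠ 0) :
    goA k n (e + 1) (arr.set p 1) x = goA k n (e + 1) arr x := by
  by_cases hen : e + 1 < n
  · have hnz : arr.getD (e + 1) 0 ≠ 0 := by
      rcases hbound with h | h
      · omega
      · exact h
    refine goA_nz k n (e + 1) (arr.set p 1) arr x (by simp) ?_ ?_
    · intro m hm
      exact getD_set_ne arr p m (by omega)
    · rw [getD_set_ne arr p (e + 1) (by omega)]; exact hnz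
  · unfold goA
    rw [dif_neg hen, dif_neg hen]

-- single-step reductions of goA and goB.
lemma goA_stop (k : Int) (n i : Nat) (arr : List Int) (bc : Int) (h : ¬ i < n) :
    goA k n i arr bc = false := by
  rw [goA, dif_neg h]

lemma goA_step_place (k : Int) (n i : Nat) (arr : List Int) (bc : Int) (h : i < n)
    (hcond : (arr.getD i 0 == 0 && ((i == 0) || (arr.getD (i - 1) 0 == 0)) &&
              ((i == n - 1) || (arr.getD (i + 1) 0 == 0))) = true) :
    goA k n i arr bc =
      (if bc + 1 == k then true else goA k n (i + 1) (arr.set i 1) (bc + 1)) := by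
  conv_lhs => rw [goA]
  rw [dif_pos h]
  simp only [hcond, if_true]

lemma goA_step_skip (k : Int) (n i : Nat) (arr : List Int) (bc : Int) (h : i < n)
    (hcond : (arr.getD i 0 == 0 && ((i == 0) || (arr.getD (i - 1) 0 == 0)) &&
              ((i == n - 1) || (arr.getD (i + 1) 0 == 0))) = false) :
    goA k n i arr bc = goA k n (i + 1) arr bc := by
  conv_lhs => rw [goA]
  rw [dif_pos h]
  simp only [hcond, Bool.false_eq_true, if_false]

lemma goB_stop (arr : List Int) (n i : Nat) (need : Int) (h : ¬ i < n) :
    goB arr n i need = false := by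
  rw [goB, dif_neg h]

lemma goB_skip (arr : List Int) (n i : Nat) (need : Int) (h : i < n)
    (h0 : arr.getD i 0 ≠ 0) :
    goB arr n i need = goB arr n (i + 1) need := by
  conv_lhs => rw [goB]
  rw [dif_pos h]
  have : (arr.getD i 0 != 0) = true := by simpa using h0
  simp only [this, if_true]

lemma goB_run (arr : List Int) (n i : Nat) (need : Int) (h : i < n)
    (h0 : arr.getD i 0 = 0) :
    goB arr n i need =
      (if (placeRunB (scanB arr n i - 1) (decide (scanB arr n i < n))
             (if i == 0 then i else i + 1) need).1 then true
       else goB arr n (scanB arr n i)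
              (placeRunB (scanB arr n i - 1) (decide (scanB arr n i < n))
                 (if i == 0 then i else i + 1) need).2) := by
  conv_lhs => rw [goB]
  rw [dif_pos h]
  have : (arr.getD i 0 != 0) = false := by simpa using h0
  simp only [this, Bool.false_eq_true, if_false]

lemma getD_set_self (arr : List Int) (i : Nat) (h : i < arr.length) :
    (arr.set i 1).getD i 0 = 1 := by
  simp [List.getD, h]

-- processing one zero run [p..e]: A's walk equals B's placeRunB arithmetic.
lemma run_go (k : Int) (n e p : Nat) (arr : List Int) (bc : Int)
    (he : e < n) (hn : n = arr.length) (hp : p ≤ e + 1)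
    (hbound : e + 1 = n ∨ arr.getD (e + 1) 0 ≠ 0)
    (hz : ∀ m, p ≤ m → m ≤ e → arr.getD m 0 = 0)
    (hleft : p = 0 ∨ arr.getD (p - 1) 0 = 0) :
    goA k n p arr bc =
      (if (placeRunB e (decide (e + 1 < n)) p (k - bc)).1 then true
       else goA k n (e + 1) arr (k - (placeRunB e (decide (e + 1 < n)) p (k - bc)).2)) := by
  by_cases hpe : p ≤ e
  · have hpn : p < n := by omega
    have h0 : arr.getD p 0 = 0 := hz p le_rfl hpe
    have hl : ((p == 0) || (arr.getD (p - 1) 0 == 0)) = true := by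
      rcases hleft with h | h
      · simp [h]
      · have h' : arr[p - 1]?.getD 0 = 0 := by simpa [List.getD] using h
        simp [h']
    by_cases hple : p < e
    · -- interior cell of the run: A places a book here
      have h1 : arr.getD (p + 1) 0 = 0 := hz (p + 1) (by omega) (by omega)
      have hcond : (arr.getD p 0 == 0 && ((p == 0) || (arr.getD (p - 1) 0 == 0)) &&
              ((p == n - 1) || (arr.getD (p + 1) 0 == 0))) = true := by
        have h0' : arr[p]?.getD 0 = 0 := by simpa [List.getD] using h0
        have h1' : arr[p + 1]?.getD 0 = 0 := by simpa [List.getD] using h1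
        have hl' : p = 0 ∨ arr[p - 1]?.getD 0 = 0 := by simpa [List.getD] using hl
        simp [h0', h1', hl']
      rw [goA_step_place k n p arr bc hpn hcond]
      have hne : (p == e) = false := by simp; omega
      have hrb : placeRunB e (decide (e + 1 < n)) p (k - bc) =
          (if k - bc - 1 == 0 then (true, k - bc - 1)
           else placeRunB e (decide (e + 1 < n)) (p + 2) (k - bc - 1)) := by
        conv_lhs => rw [placeRunB]
        simp [hpe, hne]
      by_cases hbc : bc + 1 = k
      · have ht : (bc + 1 == k) = true := by simpa using hbc
        have hz0 : ((k - bc - 1 : Int) == 0) = true := by simp; omega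
        rw [ht, hrb, hz0]
        simp
      · have hf : (bc + 1 == k) = false := by simpa using hbc
        have hz0 : ((k - bc - 1 : Int) == 0) = false := by simp; omega
        rw [hf, hrb, hz0]
        simp only [Bool.false_eq_true, if_false]
        -- A skips the cell after the placed book
        have hp1n : p + 1 < n := by omega
        have hsetp : (arr.set p 1).getD p 0 = 1 := getD_set_self arr p (by omega)
        have hcond2 : ((arr.set p 1).getD (p + 1) 0 == 0 &&
              ((p + 1 == 0) || ((arr.set p 1).getD (p + 1 - 1) 0 == 0)) &&
              ((p + 1 == n - 1) || ((arr.set p 1).getD (p + 1 + 1) 0 == 0))) = false := by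
          have e1 : p + 1 - 1 = p := by omega
          have hsetp' : (arr.set p 1)[p]?.getD 0 = 1 := by simpa [List.getD] using hsetp
          rw [e1]
          simp [hsetp']
        rw [goA_step_skip k n (p + 1) (arr.set p 1) (bc + 1) hp1n hcond2]
        have IH := run_go k n e (p + 2) (arr.set p 1) (bc + 1) he (by simp [hn])
          (by omega)
          (by rcases hbound with h | h
              · exact Or.inl h
              · exact Or.inr (by rw [getD_set_ne arr p (e + 1) (by omega)]; exact h))
          (fun m hm1 hm2 => by
            rw [getD_set_ne arr p m (by omega)]; exact hz m (by omega) hm2)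
          (Or.inr (by
            have e1 : p + 2 - 1 = p + 1 := by omega
            rw [e1, getD_set_ne arr p (p + 1) (by omega)]; exact h1))
        rw [IH]
        have harg : k - (bc + 1) = k - bc - 1 := by ring
        rw [harg, goA_tail k n e arr p _ hn hpe hbound]
    · -- p = e : the last cell of the run
      have hpeq : p = e := by omega
      by_cases hen : e + 1 = n
      · -- run touches the right edge: A places here
        have hb : (decide (e + 1 < n)) = false := by simp; omega
        have hr : (p == n - 1) = true := by simp; omega
        have hcond : (arr.getD p 0 == 0 && ((p == 0) || (arr.getD (p - 1) 0 == 0)) &&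
              ((p == n - 1) || (arr.getD (p + 1) 0 == 0))) = true := by
          have h0' : arr[p]?.getD 0 = 0 := by simpa [List.getD] using h0
          have hl' : p = 0 ∨ arr[p - 1]?.getD 0 = 0 := by simpa [List.getD] using hl
          simp [h0', hl', hr]
        rw [goA_step_place k n p arr bc hpn hcond]
        have hrb : placeRunB e false p (k - bc) =
            (if k - bc - 1 == 0 then (true, k - bc - 1)
             else placeRunB e false (p + 2) (k - bc - 1)) := by
          conv_lhs => rw [placeRunB]
          simp [hpe]
        by_cases hbc : bc + 1 = k
        · have ht : (bc + 1 == k) = true := by simpa using hbc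
          have hz0 : ((k - bc - 1 : Int) == 0) = true := by simp; omega
          rw [ht, hb, hrb, hz0]
          simp
        · have hf : (bc + 1 == k) = false := by simpa using hbc
          have hz0 : ((k - bc - 1 : Int) == 0) = false := by simp; omega
          rw [hf, hb, hrb, hz0]
          simp only [Bool.false_eq_true, if_false]
          have hstop2 : placeRunB e false (p + 2) (k - bc - 1) = (false, k - bc - 1) := by
            rw [placeRunB]
            have : ¬ (p + 2 ≤ e) := by omega
            simp [this]
          rw [hstop2]
          simp only [Bool.false_eq_true, if_false]
          rw [goA_stop k n (p + 1) (arr.set p 1) (bc + 1) (by omega),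
              goA_stop k n (e + 1) arr (k - (k - bc - 1)) (by omega)]
      · -- a book bounds the run on the right: A must skip this cell
        have hnz : arr.getD (e + 1) 0 ≠ 0 := by
          rcases hbound with h | h
          · omega
          · exact h
        have hb : (decide (e + 1 < n)) = true := by simp; omega
        have hr1 : (p == n - 1) = false := by simp; omega
        have hnz1 : ¬ arr[p + 1]?.getD 0 = 0 := by
          have hx : arr.getD (p + 1) 0 ≠ 0 := by rw [hpeq]; exact hnz
          simpa [List.getD] using hx
        have hcond : (arr.getD p 0 == 0 && ((p == 0) || (arr.getD (p - 1) 0 == 0)) &&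
              ((p == n - 1) || (arr.getD (p + 1) 0 == 0))) = false := by
          simp [hr1, hnz1]
        rw [goA_step_skip k n p arr bc hpn hcond]
        have hpeT : (p == e) = true := by simp [hpeq]
        have hrb : placeRunB e true p (k - bc) = (false, k - bc) := by
          rw [placeRunB]
          simp [hpe, hpeT]
        rw [hb, hrb]
        simp only [Bool.false_eq_true, if_false]
        have harg : k - (k - bc) = bc := by ring
        rw [harg, hpeq]
  · -- p = e + 1 : the run is already exhausted
    have hpeq : p = e + 1 := by omega
    have hrb : placeRunB e (decide (e + 1 < n)) p (k - bc) = (false, k - bc) := by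
      rw [placeRunB]
      simp [hpe]
    rw [hrb]
    simp only [Bool.false_eq_true, if_false]
    have harg : k - (k - bc) = bc := by ring
    rw [harg, hpeq]
  termination_by e + 1 - p
  decreasing_by omega

-- outer correspondence between A's index loop and B's run loop.
lemma main_go (k : Int) (i : Nat) (arr : List Int) (bc : Int)
    (hinv : i = 0 ∨ arr.getD (i - 1) 0 ≠ 0 ∨ arr.getD i 0 ≠ 0) :
    goA k arr.length i arr bc = goB arr arr.length i (k - bc) := by
  by_cases hi : i < arr.length
  · by_cases h0 : arr.getD i 0 = 0
    · -- a zero run starts at i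
      have hj_gt := scanB_gt arr arr.length i hi h0
      have hj_le := scanB_le arr arr.length i (le_of_lt hi)
      have hzeros := scanB_zeros arr arr.length i
      have hend := scanB_end arr arr.length i (le_of_lt hi)
      rw [goB_run arr arr.length i (k - bc) hi h0]
      have he1 : scanB arr arr.length i - 1 + 1 = scanB arr arr.length i := by omega
      have hfi : i ≤ (if i == 0 then i else i + 1) := by split <;> omega
      have hfirst : goA k arr.length i arr bc =
          goA k arr.length (if i == 0 then i else i + 1) arr bc := by
        by_cases hi0 : i = 0
        · simp [hi0]
        · have hnl : arr.getD (i - 1) 0 ≠ 0 := by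
            rcases hinv with h | h | h
            · omega
            · exact h
            · exact absurd h0 h
          have hi0' : (i == 0) = false := by simp [hi0]
          have hcond : (arr.getD i 0 == 0 && ((i == 0) || (arr.getD (i - 1) 0 == 0)) &&
                ((i == arr.length - 1) || (arr.getD (i + 1) 0 == 0))) = false := by
            have hnl' : ¬ arr[i - 1]?.getD 0 = 0 := by simpa [List.getD] using hnl
            simp [hi0', hnl']
          rw [hi0']
          simp only [Bool.false_eq_true, if_false]
          exact goA_step_skip k arr.length i arr bc hi hcond
      rw [hfirst]
      have hrun := run_go k arr.length (scanB arr arr.length i - 1)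
          (if i == 0 then i else i + 1) arr bc (by omega) rfl
          (by split <;> omega)
          (by rw [he1]; exact hend)
          (fun m hm1 hm2 => hzeros m (by omega) (by omega))
          (by by_cases hi0 : i = 0
              · exact Or.inl (by simp [hi0])
              · refine Or.inr ?_
                have hi0' : (i == 0) = false := by simp [hi0]
                rw [hi0']
                simpa [List.getD] using h0)
      rw [he1] at hrun
      rw [hrun]
      by_cases hr1 : (placeRunB (scanB arr arr.length i - 1)
          (decide (scanB arr arr.length i < arr.length))
          (if i == 0 then i else i + 1) (k - bc)).1
      · rw [hr1]
        simp
      · have hr1' : (placeRunB (scanB arr arr.length i - 1)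
            (decide (scanB arr arr.length i < arr.length))
            (if i == 0 then i else i + 1) (k - bc)).1 = false := by
          simpa using hr1
        rw [hr1']
        simp only [Bool.false_eq_true, if_false]
        rcases Nat.lt_or_ge (scanB arr arr.length i) arr.length with hjn | hjn
        · have hnzj : arr.getD (scanB arr arr.length i) 0 ≠ 0 := by
            rcases hend with h | h
            · omega
            · exact h
          have hrec := main_go k (scanB arr arr.length i) arr
            (k - (placeRunB (scanB arr arr.length i - 1)
              (decide (scanB arr arr.length i < arr.length))
              (if i == 0 then i else i + 1) (k - bc)).2)
            (Or.inr (Or.inr hnzj))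
          rw [hrec]
          congr 1
          ring
        · have hjn' : ¬ scanB arr arr.length i < arr.length := by omega
          rw [goA_stop _ _ _ _ _ hjn', goB_stop _ _ _ _ hjn']
    · -- nonzero cell: both sides skip it
      have hcond : (arr.getD i 0 == 0 && ((i == 0) || (arr.getD (i - 1) 0 == 0)) &&
            ((i == arr.length - 1) || (arr.getD (i + 1) 0 == 0))) = false := by
        have h0' : ¬ arr[i]?.getD 0 = 0 := by simpa [List.getD] using h0
        simp [h0']
      rw [goA_step_skip k arr.length i arr bc hi hcond,
          goB_skip arr arr.length i (k - bc) hi h0]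
      exact main_go k (i + 1) arr bc (Or.inr (Or.inl (by simpa [List.getD] using h0)))
  · rw [goA_stop _ _ _ _ _ hi, goB_stop _ _ _ _ hi]
  termination_by arr.length - i
  decreasing_by all_goals omega

-- ===== VERDICT (by name: the statement is the Claim_ definition above) =====
theorem placeBooks_spec : Claim_equal_placeBooks := by
  intro arr k _
  unfold Spec_placeBooks placeBooks placeBooks_alt
  by_cases hk : k == 0
  · simp [hk]
  · simp only [hk]
    have := main_go k 0 arr 0 (Or.inl rfl)
    simpa using this
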